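-- pv_equiv track=rewrite | github.com/quirogaco/active_document | test/excel/excel_valida - copia.py | valida_jerarquia_padre
-- ===== SOURCE A (Python) =====
-- CI = {
--     "ID"            : 0,
--     "TIPO"          : 1,
--     "CODIGO"        : 2,
--     "NOMBRE_D"      : 3,
--     "NOMBRE_S"      : 4,
--     "NOMBRE_SS"     : 5,
--     "NOMBRE_T"      : 6,
--     "GESTION"       : 7,
--     "CENTRAL"       : 8,
--     "ELIMINACION"   : 9,
--     "SELECCION"     : 10,
--     "CONSERVACION"  : 11,
--     "MICROFILMACION": 12,
--     "PAPEL"         : 13,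
--     "ELECTRONICO"   : 14
-- }
--
-- def valida_jerarquia_padre(anterior, actual, fila):
--     mensaje = ""
--     try:
--         tipo_anterior = anterior[CI["TIPO"]]
--     except:
--         tipo_anterior = ""
--     tipo_actual = actual[CI["TIPO"]]
--
--     match tipo_actual:
--         case "S":
--             if tipo_anterior != "D":
--                 mensaje = "JERARQUIA: Serie mal ubicada (debe ir despues de una Dependencia) [" + str(fila) + "], " + str([str(x) for x in actual])
--
--         case "SS":
--             if tipo_anterior != "S":
--                 mensaje = "JERARQUIA: SubSerie mal ubicada (debe ir despues de una Serie) [" + str(fila) + "], " + str([str(x) for x in actual])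
--
--         case "T":
--             if tipo_anterior not in ["S", "SS", "T"]:
--                 mensaje = "JERARQUIA: Tipo mal ubicado (debe ir despues de una Serie o Subberie) [" + str(fila) + "], " + str([str(x) for x in actual])
--
--     return mensaje
-- ===== SOURCE B (Python) =====
-- # Rank-arithmetic rewrite: map each row type to a numeric hierarchy level and
-- # validate with one arithmetic comparison (child level = parent level + 1,
-- # except Tipo which may follow any level >= Serie), instead of per-type
-- # allowed-parent string sets.
-- _LEVEL = {"D": 1, "S": 2, "SS": 3, "T": 4}
-- _DESC = ["", "",
--          "Serie mal ubicada (debe ir despues de una Dependencia)",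
--          "SubSerie mal ubicada (debe ir despues de una Serie)",
--          "Tipo mal ubicado (debe ir despues de una Serie o Subberie)"]
--
-- def valida_jerarquia_padre(anterior, actual, fila):
--     la = _LEVEL.get(anterior[1], 0) if len(anterior) > 1 else 0
--     lc = _LEVEL.get(actual[1], 0)
--     ok = lc < 2 or (la == lc - 1 if lc < 4 else la >= 2)
--     if ok:
--         return ""
--     return "JERARQUIA: " + _DESC[lc] + " [" + str(fila) + "], " + str([str(x) for x in actual])
-- ===== Notes on version B (the rewrite author's own statement) =====
-- stated objective: alternative
-- what changed: Replaces the three-branch match on per-type allowed-parent string sets with a numeric hierarchy-level encoding (D=1,S=2,SS=3,T=4) validated by one arithmetic comparison (child level must be parent level + 1, except Tipo which accepts any parent level >= Serie), with the message text indexed by the child level.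
import Mathlib
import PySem

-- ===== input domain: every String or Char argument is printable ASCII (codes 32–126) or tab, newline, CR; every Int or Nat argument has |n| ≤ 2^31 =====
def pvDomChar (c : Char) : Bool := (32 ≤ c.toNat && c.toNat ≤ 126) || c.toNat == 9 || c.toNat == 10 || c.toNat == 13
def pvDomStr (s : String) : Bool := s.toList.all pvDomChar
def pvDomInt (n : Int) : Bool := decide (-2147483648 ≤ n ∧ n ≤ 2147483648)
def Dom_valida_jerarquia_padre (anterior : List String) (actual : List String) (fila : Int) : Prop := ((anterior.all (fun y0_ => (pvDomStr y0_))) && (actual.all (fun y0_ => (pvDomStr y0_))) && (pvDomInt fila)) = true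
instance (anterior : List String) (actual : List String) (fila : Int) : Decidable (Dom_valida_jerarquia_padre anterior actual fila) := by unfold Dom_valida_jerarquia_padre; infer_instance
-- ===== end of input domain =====

-- B replaces A's three-branch match on allowed-parent string sets with numeric
-- hierarchy levels and one arithmetic comparison (simpler, data-driven); same result.

-- shared primitive: Python repr(s) for a string — exact on the Dom alphabet
-- (printable ASCII plus tab/newline/CR; those are the only chars repr escapes there)
def pyReprStr (s : String) : List Char :=
  let cs := s.toList
  let q : Char := if cs.contains '\'' && !cs.contains '"' then '"' else '\''
  q :: (cs.flatMap (fun c =>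
    if c = '\\' then ['\\', '\\']
    else if c = q then ['\\', q]
    else if c = '\t' then ['\\', 't']
    else if c = '\n' then ['\\', 'n']
    else if c = '\r' then ['\\', 'r']
    else [c])) ++ [q]

-- shared primitive: str(list_of_strings) = "[" + ", ".join(repr of each) + "]"
def pyStrListChars (xs : List String) : List Char :=
  '[' :: (List.intercalate [',', ' '] (xs.map pyReprStr)) ++ [']']

-- ===== PORT A =====
def valida_jerarquia_padre (anterior : List String) (actual : List String) (fila : Int) : String :=
  -- try: anterior[1] except: ""  (only IndexError can occur on a List String)
  let tipo_anterior := (PySem.List.pyGet? anterior 1).getD ""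
  -- actual[1]: Pre_ guarantees the index is in range (Python raises otherwise)
  let tipo_actual := (PySem.List.pyGet? actual 1).getD ""
  if tipo_actual = "S" then
    if tipo_anterior ≠ "D" then
      String.ofList ("JERARQUIA: Serie mal ubicada (debe ir despues de una Dependencia) [".toList
        ++ PySem.Int.toChars fila ++ "], ".toList ++ pyStrListChars actual)
    else ""
  else if tipo_actual = "SS" then
    if tipo_anterior ≠ "S" then
      String.ofList ("JERARQUIA: SubSerie mal ubicada (debe ir despues de una Serie) [".toList
        ++ PySem.Int.toChars fila ++ "], ".toList ++ pyStrListChars actual)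
    else ""
  else if tipo_actual = "T" then
    if ¬ (tipo_anterior ∈ ["S", "SS", "T"]) then
      String.ofList ("JERARQUIA: Tipo mal ubicado (debe ir despues de una Serie o Subberie) [".toList
        ++ PySem.Int.toChars fila ++ "], ".toList ++ pyStrListChars actual)
    else ""
  else ""

-- ===== PORT B =====
def pvLevelDict : PySem.Dict String Int :=
  PySem.Dict.ofList [("D", 1), ("S", 2), ("SS", 3), ("T", 4)]

def pvDesc : List String :=
  ["", "",
   "Serie mal ubicada (debe ir despues de una Dependencia)",
   "SubSerie mal ubicada (debe ir despues de una Serie)",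
   "Tipo mal ubicado (debe ir despues de una Serie o Subberie)"]

def valida_jerarquia_padre_alt (anterior : List String) (actual : List String) (fila : Int) : String :=
  let la : Int := if 1 < anterior.length then pvLevelDict.getD ((PySem.List.pyGet? anterior 1).getD "") 0 else 0
  let lc : Int := pvLevelDict.getD ((PySem.List.pyGet? actual 1).getD "") 0
  let ok : Bool := lc < 2 || (if lc < 4 then la == lc - 1 else la ≥ 2)
  if ok then ""
  else
    String.ofList ("JERARQUIA: ".toList ++ ((PySem.List.pyGet? pvDesc lc).getD "").toList
      ++ " [".toList ++ PySem.Int.toChars fila ++ "], ".toList ++ pyStrListChars actual)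

-- ===== PRECONDITION & SPEC =====
-- Pre_ excludes only the inputs where A raises IndexError (actual[1] out of range).
def Pre_valida_jerarquia_padre (anterior : List String) (actual : List String) (fila : Int) : Prop :=
  1 < actual.length
instance (anterior : List String) (actual : List String) (fila : Int) : Decidable (Pre_valida_jerarquia_padre anterior actual fila) := by unfold Pre_valida_jerarquia_padre; infer_instance

def pvWitness_valida_jerarquia_padre : List String × List String × Int := (["x", "D"], ["y", "S"], 3)

def Spec_valida_jerarquia_padre (anterior : List String) (actual : List String) (fila : Int) (out : String) : Prop := out = valida_jerarquia_padre_alt anterior actual fila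
instance (anterior : List String) (actual : List String) (fila : Int) (out : String) : Decidable (Spec_valida_jerarquia_padre anterior actual fila out) := by unfold Spec_valida_jerarquia_padre; infer_instance

-- ===== CLAIM (what is proved, stated in full; the proofs are below) =====
def Claim_equal_valida_jerarquia_padre : Prop := ∀ (anterior : List String) (actual : List String) (fila : Int), Dom_valida_jerarquia_padre anterior actual fila → Pre_valida_jerarquia_padre anterior actual fila → Spec_valida_jerarquia_padre anterior actual fila (valida_jerarquia_padre anterior actual fila)

-- ===== LEMMAS AND PROOFS =====

theorem tipo_anterior_eq (anterior : List String) (f : String → Int) :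
    (if 1 < anterior.length then f ((PySem.List.pyGet? anterior 1).getD "") else f "") =
      f ((PySem.List.pyGet? anterior 1).getD "") := by
  by_cases h : 1 < anterior.length
  · simp [h]
  · have h0 : PySem.List.pyGet? anterior 1 = none := by
      rw [PySem.List.pyGet?_eq_none_iff]
      simp [PySem.Raise.InRange]; omega
    simp [h, h0]

theorem pvLevel_chars (t : String) :
    pvLevelDict.getD t 0 =
      if t = "D" then 1 else if t = "S" then 2 else if t = "SS" then 3
      else if t = "T" then 4 else 0 := by
  rw [show pvLevelDict = PySem.Dict.mk [("D", 1), ("S", 2), ("SS", 3), ("T", 4)] from rfl]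
  by_cases h1 : t = "D"
  · subst h1; decide
  by_cases h2 : t = "S"
  · subst h2; decide
  by_cases h3 : t = "SS"
  · subst h3; decide
  by_cases h4 : t = "T"
  · subst h4; decide
  simp [PySem.Dict.getD, PySem.Dict.get?_mk_cons, PySem.Dict.get?, beq_iff_eq,
    Ne.symm h1, Ne.symm h2, Ne.symm h3, Ne.symm h4, h1, h2, h3, h4]

-- ===== VERDICT (by name: the statement is the Claim_ definition above) =====
theorem valida_jerarquia_padre_spec : Claim_equal_valida_jerarquia_padre := by
  intro anterior actual fila _ _
  unfold Spec_valida_jerarquia_padre valida_jerarquia_padre valida_jerarquia_padre_alt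
  simp only []
  rw [show (if 1 < anterior.length then pvLevelDict.getD ((PySem.List.pyGet? anterior 1).getD "") 0 else (0:Int))
        = pvLevelDict.getD ((PySem.List.pyGet? anterior 1).getD "") 0 from by
      have := tipo_anterior_eq anterior (fun s => pvLevelDict.getD s 0)
      simpa [pvLevel_chars] using this]
  rw [pvLevel_chars, pvLevel_chars]
  generalize (PySem.List.pyGet? anterior 1).getD "" = ta
  generalize (PySem.List.pyGet? actual 1).getD "" = tc
  by_cases h1 : tc = "S" <;> by_cases h2 : tc = "SS" <;> by_cases h3 : tc = "T" <;>
    by_cases h0 : tc = "D" <;>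
    by_cases g1 : ta = "D" <;> by_cases g2 : ta = "S" <;> by_cases g3 : ta = "SS" <;>
      by_cases g4 : ta = "T" <;>
      simp_all [pvDesc, PySem.List.pyGet?, PySem.List.pyIdx?]
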